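-- pv_equiv track=rewrite | github.com/spodduturire/COMPSCI-683-Artificial-Intelligence | Sudoku Solver/sudoku_solver.py | get_next_position_to_fill
-- ===== SOURCE A (Python) =====
-- def get_mrv_position(sudoku, dms):
--     ''' Get the position with minimum remaining values
--         input: sudoku: the sudoku to be solved
--                kwargs: other keyword arguments'
--         output: x: row number
--                 y: column number'''
--     dms = get_domain(sudoku)
--     x, y, min_dms = -1, -1, float('inf')
--
--     for i in range(len(sudoku)):
--         for j in range(len(sudoku)):
--             if sudoku[i][j] == -1:
--                 domain_size = len(dms[i][j])
--                 if domain_size < min_dms: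
--                     min_dms = domain_size
--                     x = i
--                     y = j
--     return x, y
--
-- def get_domain(sudoku):
--     domains = []
--     for i in range(9):
--         domain_row = []
--         for j in range(9):
--             if sudoku[i][j] == -1:
--                 domain = list(range(1, 10))
--                 for k in range(len(sudoku)):
--                     if sudoku[i][k] in domain:
--                         domain.remove(sudoku[i][k])
--                 for k in range(len(sudoku)):
--                     if sudoku[k][j] in domain:
--                         domain.remove(sudoku[k][j])
--                 box = []
--                 for k in range((i // 3) * 3, ((i // 3) * 3)+3):
--                     for l in range((j // 3) * 3, ((j // 3) * 3)+3):
--                         box.append(sudoku[k][l])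
--                 for k in range(len(box)):
--                     if box[k] in domain:
--                         domain.remove(box[k])
--                 domain_row.append(domain)
--             else:
--                 domain_row.append([sudoku[i][j]])
--         domains.append(domain_row)
--     return domains
--
-- def get_next_position_to_fill(sudoku, x, y, mrv_on, dms):
--     ''' Get the next position to fill durin the backtracking
--         input: sudoku: the sudoku to be solved
--                x: row number
--                y: column number
--                mrv_on: True if mrv is on, False otherwise
--                kwargs: other keyword arguments
--         output: nx: next row number
--                 ny: next column number'''
--     if mrv_on == False:
--         for i in range(len(sudoku)):
--             for j in range(len(sudoku)):
--                 if sudoku[i][j] == -1: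
--                     return i, j
--         return -1, -1
--
--     if mrv_on == True:
--         return get_mrv_position(sudoku, dms)
-- ===== SOURCE B (Python) =====
-- def get_next_position_to_fill(sudoku, x, y, mrv_on, dms):
--     if not mrv_on:
--         n = len(sudoku)
--         for i, row in enumerate(sudoku[:n]):
--             r = row[:n]
--             if -1 in r:
--                 return i, r.index(-1)
--         return -1, -1
--     # Precompute one used-value set per row, per column and per 3x3 box, then
--     # score each empty cell by pure table lookups (no per-cell neighbourhood scan).
--     rows = [set(r[:9]) for r in sudoku]
--     cols = [{sudoku[k][j] for k in range(9)} for j in range(9)]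
--     boxes = [{sudoku[3 * (b // 3) + di][3 * (b % 3) + dj]
--               for di in range(3) for dj in range(3)} for b in range(9)]
--     bx, by, bc = -1, -1, 10
--     for i in range(9):
--         for j in range(9):
--             if sudoku[i][j] == -1:
--                 b = (i // 3) * 3 + j // 3
--                 c = sum(1 for v in range(1, 10)
--                         if v not in rows[i] and v not in cols[j] and v not in boxes[b])
--                 if c < bc:
--                     bx, by, bc = i, j, c
--     return bx, by
-- ===== Notes on version B (the rewrite author's own statement) =====
-- stated objective: alternative
-- what changed: A materializes a full 9x9 grid of per-cell candidate lists (get_domain: for every cell, rebuild list(range(1,10)) and delete row/column/box neighbours one by one with list.remove) and then rescans that grid for the minimum; B never builds per-cell domains at all: it precomputes 27 used-value tables (one set per row, per column and per 3x3 box) once, and scores each empty cell purely by lookups into those tables, counting the values 1..9 absent from all three; the first-empty branch walks enumerate(sudoku) and uses 'in'/'.index' on the row instead of A's index loops.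
import Mathlib
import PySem

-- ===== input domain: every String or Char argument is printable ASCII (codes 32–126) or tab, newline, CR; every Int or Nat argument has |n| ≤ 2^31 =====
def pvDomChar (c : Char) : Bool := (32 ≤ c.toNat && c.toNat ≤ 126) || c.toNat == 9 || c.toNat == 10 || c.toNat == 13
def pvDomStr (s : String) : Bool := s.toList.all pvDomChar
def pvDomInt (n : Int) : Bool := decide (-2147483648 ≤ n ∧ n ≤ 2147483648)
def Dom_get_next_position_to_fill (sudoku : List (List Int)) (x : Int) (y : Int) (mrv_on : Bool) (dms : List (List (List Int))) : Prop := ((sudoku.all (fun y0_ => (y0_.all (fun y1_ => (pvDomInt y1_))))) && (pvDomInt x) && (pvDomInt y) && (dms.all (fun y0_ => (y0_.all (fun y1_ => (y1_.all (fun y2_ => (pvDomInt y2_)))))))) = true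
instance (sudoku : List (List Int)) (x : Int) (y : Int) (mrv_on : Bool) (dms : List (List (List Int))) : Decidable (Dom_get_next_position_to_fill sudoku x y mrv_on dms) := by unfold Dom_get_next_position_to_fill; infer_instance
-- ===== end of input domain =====

-- B drops A's per-cell candidate-grid construction (get_domain) entirely: it precomputes 27
-- used-value tables (one set per row, column and 3×3 box) once and scores each empty cell by
-- table lookups alone; the first-empty branch uses enumerate with 'in'/'.index' on the row.

-- ===== PORT A =====
-- 'if sudoku[..] in domain: domain.remove(sudoku[..])' (remove of a present element never raises)
def pvRemStep (d : List Int) (v : Int) : List Int :=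
  if d.contains v then (PySem.List.remove? d v).getD d else d

def pvBoxA (sudoku : List (List Int)) (i j : Int) : List Int :=
  (PySem.List.pyRange (PySem.Int.floordiv i 3 * 3) (PySem.Int.floordiv i 3 * 3 + 3)).foldl
    (fun box k =>
      (PySem.List.pyRange (PySem.Int.floordiv j 3 * 3) (PySem.Int.floordiv j 3 * 3 + 3)).foldl
        (fun box l => box ++ [PySem.List.pyGetD (PySem.List.pyGetD sudoku k []) l 0]) box) []

-- the body of get_domain's 'if sudoku[i][j] == -1' branch (indexing via pyGetD: in range under Pre_)
def pvCellDomainA (sudoku : List (List Int)) (i j : Int) : List Int :=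
  let d0 := PySem.List.pyRange 1 10
  let d1 := (PySem.List.pyRange 0 (PySem.List.len sudoku)).foldl
      (fun d k => pvRemStep d (PySem.List.pyGetD (PySem.List.pyGetD sudoku i []) k 0)) d0
  let d2 := (PySem.List.pyRange 0 (PySem.List.len sudoku)).foldl
      (fun d k => pvRemStep d (PySem.List.pyGetD (PySem.List.pyGetD sudoku k []) j 0)) d1
  let box := pvBoxA sudoku i j
  (PySem.List.pyRange 0 (PySem.List.len box)).foldl
      (fun d k => pvRemStep d (PySem.List.pyGetD box k 0)) d2

def pv_get_domain (sudoku : List (List Int)) : List (List (List Int)) :=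
  (PySem.List.pyRange 0 9).foldl (fun domains i =>
    domains ++ [(PySem.List.pyRange 0 9).foldl (fun dr j =>
      dr ++ [if PySem.List.pyGetD (PySem.List.pyGetD sudoku i []) j 0 == -1
             then pvCellDomainA sudoku i j
             else [PySem.List.pyGetD (PySem.List.pyGetD sudoku i []) j 0]]) []]) []

-- one iteration of get_mrv_position's nested loop; float('inf') is modeled as 'none' (Option Int):
-- it is only compared with '<' against domain sizes and overwritten, so this is exact
def pvMrvStepA (sudoku : List (List Int)) (dms : List (List (List Int)))
    (st : Int × Int × Option Int) (i j : Int) : Int × Int × Option Int :=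
  if PySem.List.pyGetD (PySem.List.pyGetD sudoku i []) j 0 == -1 then
    let ds := PySem.List.len (PySem.List.pyGetD (PySem.List.pyGetD dms i []) j [])
    match st.2.2 with
    | none => (i, j, some ds)
    | some m => if ds < m then (i, j, some ds) else st
  else st

def pv_get_mrv_position (sudoku : List (List Int)) (dms0 : List (List (List Int))) : Int × Int :=
  let dms := pv_get_domain sudoku   -- Python immediately rebinds dms, ignoring the argument
  let st := (PySem.List.pyRange 0 (PySem.List.len sudoku)).foldl (fun st i =>
      (PySem.List.pyRange 0 (PySem.List.len sudoku)).foldl (fun st j =>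
        pvMrvStepA sudoku dms st i j) st) ((-1 : Int), (-1 : Int), (none : Option Int))
  (st.1, st.2.1)

-- the mrv_on == False nested scan with early return, as a short-circuiting fold
def pvFirstEmptyA (sudoku : List (List Int)) : Option (Int × Int) :=
  (PySem.List.pyRange 0 (PySem.List.len sudoku)).foldl (fun acc i =>
    match acc with
    | some r => some r
    | none =>
      (PySem.List.pyRange 0 (PySem.List.len sudoku)).foldl (fun acc2 j =>
        match acc2 with
        | some r => some r
        | none => if PySem.List.pyGetD (PySem.List.pyGetD sudoku i []) j 0 == -1
                  then some (i, j) else none) none) none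

def get_next_position_to_fill (sudoku : List (List Int)) (x : Int) (y : Int) (mrv_on : Bool) (dms : List (List (List Int))) : Int × Int :=
  if mrv_on == false then
    match pvFirstEmptyA sudoku with
    | some r => r
    | none => (-1, -1)
  else
    -- 'if mrv_on == True' is the only remaining case of a Bool, so the Python 'return None'
    -- fall-through is unreachable
    pv_get_mrv_position sudoku dms

-- ===== PORT B =====
-- rows = [set(r[:9]) for r in sudoku]
def pvRowsB (sudoku : List (List Int)) : List (PySem.Set Int) :=
  sudoku.map (fun r => PySem.Set.ofList (PySem.List.slice r none (some 9)))

-- cols = [{sudoku[k][j] for k in range(9)} for j in range(9)]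
def pvColsB (sudoku : List (List Int)) : List (PySem.Set Int) :=
  (PySem.List.pyRange 0 9).map (fun j =>
    PySem.Set.ofList ((PySem.List.pyRange 0 9).map (fun k =>
      PySem.List.pyGetD (PySem.List.pyGetD sudoku k []) j 0)))

-- boxes = [{sudoku[3*(b//3)+di][3*(b%3)+dj] for di in range(3) for dj in range(3)} for b in range(9)]
def pvBoxesB (sudoku : List (List Int)) : List (PySem.Set Int) :=
  (PySem.List.pyRange 0 9).map (fun b =>
    PySem.Set.ofList ((PySem.List.pyRange 0 3).flatMap (fun di =>
      (PySem.List.pyRange 0 3).map (fun dj =>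
        PySem.List.pyGetD (PySem.List.pyGetD sudoku (3 * PySem.Int.floordiv b 3 + di) [])
          (3 * PySem.Int.mod b 3 + dj) 0))))

-- c = sum(1 for v in range(1, 10) if v not in rows[i] and v not in cols[j] and v not in boxes[b])
-- (a 0/1-sum over a filtered range is List.countP)
def pvCountB (rows cols boxes : List (PySem.Set Int)) (i j b : Int) : Int :=
  (((PySem.List.pyRange 1 10).countP (fun v =>
      !(PySem.List.pyGetD rows i []).contains v &&
      !(PySem.List.pyGetD cols j []).contains v &&
      !(PySem.List.pyGetD boxes b []).contains v) : Nat) : Int)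

-- one iteration of B's scoring loop; bc starts at 10 (any real count is ≤ 9)
def pvMrvStepB (sudoku : List (List Int)) (rows cols boxes : List (PySem.Set Int))
    (st : Int × Int × Int) (i j : Int) : Int × Int × Int :=
  if PySem.List.pyGetD (PySem.List.pyGetD sudoku i []) j 0 == -1 then
    let b := PySem.Int.floordiv i 3 * 3 + PySem.Int.floordiv j 3
    let c := pvCountB rows cols boxes i j b
    if c < st.2.2 then (i, j, c) else st
  else st

-- for i, row in enumerate(sudoku[:n]): r = row[:n]; if -1 in r: return i, r.index(-1)
def pvFirstEmptyB (sudoku : List (List Int)) (n : Int) : Option (Int × Int) :=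
  (PySem.List.enumerate (PySem.List.slice sudoku none (some n))).foldl (fun acc p =>
    match acc with
    | some r => some r
    | none =>
      let r := PySem.List.slice p.2 none (some n)
      if r.contains (-1) then (PySem.List.index? r (-1)).map (fun k => (p.1, (k : Int)))
      else none) none

def get_next_position_to_fill_alt (sudoku : List (List Int)) (x : Int) (y : Int) (mrv_on : Bool) (dms : List (List (List Int))) : Int × Int :=
  if !mrv_on then
    let n := PySem.List.len sudoku
    match pvFirstEmptyB sudoku n with
    | some r => r
    | none => (-1, -1)
  else
    let rows := pvRowsB sudoku
    let cols := pvColsB sudoku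
    let boxes := pvBoxesB sudoku
    let st := (PySem.List.pyRange 0 9).foldl (fun st i =>
        (PySem.List.pyRange 0 9).foldl (fun st j =>
          pvMrvStepB sudoku rows cols boxes st i j) st) ((-1 : Int), (-1 : Int), (10 : Int))
    (st.1, st.2.1)

-- ===== PRECONDITION & SPEC =====
-- Pre_ = exactly the inputs where the Python A returns (elsewhere it raises IndexError):
-- with mrv off, the row-major scan must meet a -1 before it ever indexes past the end of a short
-- row (first disjunct: no row shorter than len(sudoku); second: a -1 occurs no later than the end
-- of the first short row); with mrv on, get_domain hard-codes a 9×9 grid, so the board must have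
-- 9 rows of length ≥ 9.  This also excludes boards with MORE than 9 rows on which A happens to
-- return because every empty cell lies in the top-left 9×9 of that hard-coded grid.
def Pre_get_next_position_to_fill (sudoku : List (List Int)) (x : Int) (y : Int) (mrv_on : Bool) (dms : List (List (List Int))) : Prop :=
  if mrv_on then sudoku.length = 9 ∧ ∀ row ∈ sudoku, 9 ≤ row.length
  else (∀ row ∈ sudoku, sudoku.length ≤ row.length) ∨
    ∃ i0 < sudoku.length, (sudoku.getD i0 []).length < sudoku.length ∧
      (∀ i < i0, sudoku.length ≤ (sudoku.getD i []).length) ∧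
      ((-1 : Int) ∈ sudoku.getD i0 [] ∨ ∃ i < i0, (-1 : Int) ∈ (sudoku.getD i []).take sudoku.length)
instance (sudoku : List (List Int)) (x : Int) (y : Int) (mrv_on : Bool) (dms : List (List (List Int))) : Decidable (Pre_get_next_position_to_fill sudoku x y mrv_on dms) := by unfold Pre_get_next_position_to_fill; infer_instance

def pvWitness_get_next_position_to_fill : List (List Int) × Int × Int × Bool × List (List (List Int)) :=
  ([[-1, 2], [3, 4]], 0, 0, false, [])

def Spec_get_next_position_to_fill (sudoku : List (List Int)) (x : Int) (y : Int) (mrv_on : Bool) (dms : List (List (List Int))) (out : Int × Int) : Prop := out = get_next_position_to_fill_alt sudoku x y mrv_on dms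
instance (sudoku : List (List Int)) (x : Int) (y : Int) (mrv_on : Bool) (dms : List (List (List Int))) (out : Int × Int) : Decidable (Spec_get_next_position_to_fill sudoku x y mrv_on dms out) := by unfold Spec_get_next_position_to_fill; infer_instance

-- ===== CLAIM (what is proved, stated in full; the proofs are below) =====
def Claim_equal_get_next_position_to_fill : Prop := ∀ (sudoku : List (List Int)) (x : Int) (y : Int) (mrv_on : Bool) (dms : List (List (List Int))), Dom_get_next_position_to_fill sudoku x y mrv_on dms → Pre_get_next_position_to_fill sudoku x y mrv_on dms → Spec_get_next_position_to_fill sudoku x y mrv_on dms (get_next_position_to_fill sudoku x y mrv_on dms)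

-- ===== LEMMAS AND PROOFS =====

theorem pvWitness_ok : Dom_get_next_position_to_fill pvWitness_get_next_position_to_fill.1 pvWitness_get_next_position_to_fill.2.1 pvWitness_get_next_position_to_fill.2.2.1 pvWitness_get_next_position_to_fill.2.2.2.1 pvWitness_get_next_position_to_fill.2.2.2.2 ∧ Pre_get_next_position_to_fill pvWitness_get_next_position_to_fill.1 pvWitness_get_next_position_to_fill.2.1 pvWitness_get_next_position_to_fill.2.2.1 pvWitness_get_next_position_to_fill.2.2.2.1 pvWitness_get_next_position_to_fill.2.2.2.2 := by
  decide

theorem pvRemStep_eq (d : List Int) (v : Int) (hd : d.Nodup) :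
    pvRemStep d v = d.filter (fun x => x != v) := by
  unfold pvRemStep
  by_cases h : v ∈ d
  · rw [if_pos (List.contains_iff_mem.mpr h), PySem.List.remove?_eq_some_erase _ _ h,
      Option.getD_some, List.Nodup.erase_eq_filter hd]
  · rw [if_neg (by simpa using h)]
    exact (List.filter_eq_self.mpr (fun x hx => by
      simp only [bne_iff_ne, ne_eq]; rintro rfl; exact h hx)).symm

theorem pvRemFold (vals : List Int) (d : List Int) (hd : d.Nodup) :
    vals.foldl pvRemStep d = d.filter (fun x => !vals.contains x) := by
  induction vals generalizing d with
  | nil => simp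
  | cons v vs ih =>
    rw [List.foldl_cons, pvRemStep_eq d v hd, ih _ (hd.filter _), List.filter_filter]
    refine List.filter_congr (fun x _ => ?_)
    simp only [List.contains_cons]
    cases h1 : x == v <;> cases h2 : vs.contains x <;> simp_all

theorem map_pyGetD_range (row : List Int) (a b : Int) (ha : 0 ≤ a) (hab : a ≤ b)
    (hb : b.toNat ≤ row.length) :
    (PySem.List.pyRange a b).map (fun k => PySem.List.pyGetD row k 0)
      = (row.take b.toNat).drop a.toNat := by
  have h1 : (PySem.List.pyRange a b).map (fun k => PySem.List.pyGetD row k 0)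
      = (PySem.List.pyRange a b).map (fun k => PySem.List.pyGetD (row.take b.toNat) k 0) := by
    refine List.map_congr_left (fun k hk => ?_)
    rw [PySem.List.mem_pyRange_one] at hk
    have hka : 0 ≤ k := le_trans ha hk.1
    rw [PySem.List.pyGetD_eq_getElem _ _ hka (by omega),
        PySem.List.pyGetD_eq_getElem _ _ hka (by simp only [List.length_take]; omega)]
    exact (List.getElem_take).symm
  rw [h1]
  generalize hr : row.take b.toNat = r
  have h2 : b = PySem.List.len r := by rw [← hr]; simp; omega
  rw [h2, PySem.List.map_pyGetD_pyRange _ _ ha]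

theorem pvGrid_eq (sudoku : List (List Int)) (i j : Int)
    (hi0 : 0 ≤ i) (hi9 : i < 9) (hj0 : 0 ≤ j) (hj9 : j < 9) :
    PySem.List.pyGetD (PySem.List.pyGetD (pv_get_domain sudoku) i []) j []
      = if PySem.List.pyGetD (PySem.List.pyGetD sudoku i []) j 0 == -1
        then pvCellDomainA sudoku i j
        else [PySem.List.pyGetD (PySem.List.pyGetD sudoku i []) j 0] := by
  unfold pv_get_domain
  simp only [PySem.List.foldl_append_singleton_eq_map, List.nil_append]
  rw [PySem.List.pyGetD_map_pyRange_of_nonneg _ 9 i _ hi0 hi9,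
      PySem.List.pyGetD_map_pyRange_of_nonneg _ 9 j _ hj0 hj9]

-- A's per-cell domain length equals B's table-lookup count
theorem pvCount_eq (sudoku : List (List Int)) (i j : Int)
    (h9 : sudoku.length = 9) (hrows : ∀ row ∈ sudoku, 9 ≤ row.length)
    (hi0 : 0 ≤ i) (hi9 : i < 9) (hj0 : 0 ≤ j) (hj9 : j < 9) :
    PySem.List.len (pvCellDomainA sudoku i j)
      = pvCountB (pvRowsB sudoku) (pvColsB sudoku) (pvBoxesB sudoku) i j
          (PySem.Int.floordiv i 3 * 3 + PySem.Int.floordiv j 3) := by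
  have h3 : (0:Int) < 3 := by norm_num
  set row := PySem.List.pyGetD sudoku i [] with hrow
  have hrowmem : row ∈ sudoku := PySem.List.pyGetD_mem _ _ (by unfold PySem.Raise.InRange; omega)
  have hrowlen : 9 ≤ row.length := hrows _ hrowmem
  set bi := PySem.Int.floordiv i 3 * 3 with hbi
  set bj := PySem.Int.floordiv j 3 * 3 with hbj
  have hbi' : 0 ≤ bi ∧ bi + 3 ≤ 9 := by
    rw [hbi, PySem.Int.floordiv_eq_ediv_of_pos h3]; omega
  have hbj' : 0 ≤ bj ∧ bj + 3 ≤ 9 := by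
    rw [hbj, PySem.Int.floordiv_eq_ediv_of_pos h3]; omega
  set b := PySem.Int.floordiv i 3 * 3 + PySem.Int.floordiv j 3 with hb
  have hbdiv : PySem.Int.floordiv b 3 = PySem.Int.floordiv i 3 ∧
      PySem.Int.mod b 3 = PySem.Int.floordiv j 3 ∧ 0 ≤ b ∧ b < 9 := by
    rw [hb, PySem.Int.floordiv_eq_ediv_of_pos h3, PySem.Int.mod_eq_emod_of_pos h3,
        PySem.Int.floordiv_eq_ediv_of_pos h3, PySem.Int.floordiv_eq_ediv_of_pos h3]
    omega
  -- the three removed-value lists of A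
  set R : List Int := row.take 9 with hR
  set C : List Int := (PySem.List.pyRange 0 9).map
      (fun k => PySem.List.pyGetD (PySem.List.pyGetD sudoku k []) j 0) with hC
  set X : List Int := (PySem.List.pyRange bi (bi + 3)).flatMap
      (fun k => PySem.List.slice (PySem.List.pyGetD sudoku k []) (some bj) (some (bj + 3))) with hX
  -- per-box-row lists of A coincide with maps of cell reads
  have hboxrow : ∀ k : Int, bi ≤ k → k < bi + 3 →
      (PySem.List.pyRange bj (bj + 3)).map
        (fun l => PySem.List.pyGetD (PySem.List.pyGetD sudoku k []) l 0)
      = PySem.List.slice (PySem.List.pyGetD sudoku k []) (some bj) (some (bj + 3)) := by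
    intro k hk1 hk2
    have hmem : PySem.List.pyGetD sudoku k [] ∈ sudoku :=
      PySem.List.pyGetD_mem _ _ (by unfold PySem.Raise.InRange; omega)
    have hlen : 9 ≤ (PySem.List.pyGetD sudoku k []).length := hrows _ hmem
    rw [map_pyGetD_range _ _ _ (by omega) (by omega) (by omega),
        PySem.List.slice_toNat _ (by omega) (by omega), List.drop_take]
  -- A's domain list is a triple filter
  have hA : pvCellDomainA sudoku i j
      = (PySem.List.pyRange 1 10).filter
          (fun x => !X.contains x && !C.contains x && !R.contains x) := by
    unfold pvCellDomainA
    simp only [PySem.List.len_eq, h9, Nat.cast_ofNat]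
    rw [← List.foldl_map (f := fun k => PySem.List.pyGetD row k 0) (g := pvRemStep)]
    rw [map_pyGetD_range _ _ _ le_rfl (by norm_num) (by omega)]
    rw [show ((0:Int).toNat) = 0 from rfl, show ((9:Int).toNat) = 9 from rfl, List.drop_zero, ← hR]
    rw [pvRemFold _ _ (PySem.List.nodup_pyRange_one 1 10)]
    rw [← List.foldl_map (f := fun k => PySem.List.pyGetD (PySem.List.pyGetD sudoku k []) j 0)
        (g := pvRemStep), ← hC]
    rw [pvRemFold _ _ (((PySem.List.nodup_pyRange_one 1 10).filter _))]
    have hbox : pvBoxA sudoku i j = X := by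
      unfold pvBoxA
      simp only [PySem.List.foldl_append_singleton_eq_map, PySem.List.foldl_append_eq_flatMap,
        List.nil_append, ← hbi, ← hbj]
      rw [hX]
      refine List.flatMap_congr (fun k hk => ?_)
      rw [PySem.List.mem_pyRange_one] at hk
      exact hboxrow k hk.1 hk.2
    rw [hbox]
    rw [PySem.List.foldl_pyRange_zero_pyGetD' X 0 pvRemStep]
    rw [pvRemFold _ _ ((((PySem.List.nodup_pyRange_one 1 10).filter _).filter _))]
    rw [List.filter_filter, List.filter_filter]
  -- B's three table lookups
  have hrowsI : PySem.List.pyGetD (pvRowsB sudoku) i [] = PySem.Set.ofList R := by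
    unfold pvRowsB
    rw [PySem.List.pyGetD_eq_getElem _ _ hi0 (by simp only [List.length_map]; omega),
        List.getElem_map]
    have hrg : sudoku[i.toNat]'(by omega) = row := by
      rw [hrow, PySem.List.pyGetD_eq_getElem _ _ hi0 (by omega)]
    rw [hrg, PySem.List.slice_to _ (by norm_num : (0:Int) ≤ 9), hR]
    rfl
  have hcolsJ : PySem.List.pyGetD (pvColsB sudoku) j [] = PySem.Set.ofList C := by
    unfold pvColsB
    rw [PySem.List.pyGetD_map_pyRange_of_nonneg _ 9 j _ hj0 hj9]
  set BL : List Int := (PySem.List.pyRange 0 3).flatMap (fun di =>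
      (PySem.List.pyRange 0 3).map (fun dj =>
        PySem.List.pyGetD (PySem.List.pyGetD sudoku (3 * PySem.Int.floordiv b 3 + di) [])
          (3 * PySem.Int.mod b 3 + dj) 0)) with hBL
  have hboxB : PySem.List.pyGetD (pvBoxesB sudoku) b [] = PySem.Set.ofList BL := by
    unfold pvBoxesB
    rw [PySem.List.pyGetD_map_pyRange_of_nonneg _ 9 b _ hbdiv.2.2.1 hbdiv.2.2.2]
  -- membership in BL is membership in X
  have hXB : ∀ v : Int, v ∈ BL ↔ v ∈ X := by
    intro v
    rw [hBL, hX]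
    simp only [List.mem_flatMap, List.mem_map, PySem.List.mem_pyRange_one]
    constructor
    · rintro ⟨di, hdi, dj, hdj, rfl⟩
      refine ⟨3 * PySem.Int.floordiv b 3 + di, ⟨?_, ?_⟩, ?_⟩
      · rw [hbdiv.1]; omega
      · rw [hbdiv.1]; omega
      · rw [← hboxrow _ (by rw [hbdiv.1]; omega) (by rw [hbdiv.1]; omega)]
        simp only [List.mem_map, PySem.List.mem_pyRange_one]
        exact ⟨3 * PySem.Int.mod b 3 + dj, by rw [hbdiv.2.1]; constructor <;> omega, rfl⟩
    · rintro ⟨k, hk, hv⟩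
      rw [← hboxrow _ hk.1 hk.2] at hv
      simp only [List.mem_map, PySem.List.mem_pyRange_one] at hv
      obtain ⟨l, hl, rfl⟩ := hv
      refine ⟨k - bi, ⟨by omega, by omega⟩, l - bj, ⟨by omega, by omega⟩, ?_⟩
      have e1 : 3 * PySem.Int.floordiv b 3 + (k - bi) = k := by rw [hbdiv.1]; omega
      have e2 : 3 * PySem.Int.mod b 3 + (l - bj) = l := by rw [hbdiv.2.1, hbj]; omega
      rw [e1, e2]
  -- put it together: length of filter = countP with pointwise-equal predicates
  unfold pvCountB
  rw [hrowsI, hcolsJ, hboxB]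
  rw [hA]
  simp only [PySem.List.len_eq]
  rw [List.countP_eq_length_filter]
  have hpred : ∀ v ∈ PySem.List.pyRange 1 10,
      (!X.contains v && !C.contains v && !R.contains v)
        = (!(PySem.Set.ofList R).contains v && !(PySem.Set.ofList C).contains v &&
           !(PySem.Set.ofList BL).contains v) := by
    intro v _
    have hb' : ∀ a b : Bool, (a = true ↔ b = true) → a = b := by decide
    apply hb'
    simp only [Bool.and_eq_true, Bool.not_eq_true', PySem.Set.contains_eq_listContains]
    have m1 : ∀ (l : List Int), (l.contains v = false) ↔ v ∉ l := by
      intro l; rw [← Bool.not_eq_true, List.contains_iff_mem]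
    simp only [m1, PySem.Set.mem_ofList]
    have := hXB v
    tauto
  rw [List.filter_congr hpred]

theorem pvScanInner_eq (row : List Int) (i : Int) (n : Nat) :
    (PySem.List.pyRange 0 (n : Int)).foldl (fun acc2 j =>
        match acc2 with
        | some r => some r
        | none => if PySem.List.pyGetD row j 0 == -1 then some (i, j) else none)
      (none : Option (Int × Int))
    = ((PySem.List.pyRange 0 (n : Int)).find? (fun j => PySem.List.pyGetD row j 0 == -1)).map
        (fun j => ((i, j) : Int × Int)) := by
  induction n with
  | zero => simp [PySem.List.pyRange_one_eq_nil]
  | succ n ih =>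
    have hcast : ((n + 1 : Nat) : Int) = (n : Int) + 1 := by push_cast; ring
    rw [hcast, PySem.List.pyRange_one_succ_right (by positivity), List.foldl_append,
        List.find?_append, ih]
    cases hF : (PySem.List.pyRange 0 (n : Int)).find? (fun j => PySem.List.pyGetD row j 0 == -1) with
    | some k => simp
    | none =>
      simp only [Option.map_none, List.foldl_cons, List.foldl_nil, Option.none_or]
      by_cases hv : (PySem.List.pyGetD row (n : Int) 0 == -1) = true
      · rw [List.find?_cons_of_pos (p := fun j => PySem.List.pyGetD row j 0 == -1) hv]
        show (if (PySem.List.pyGetD row ((n : Nat) : Int) 0 == -1) = true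
              then some ((i, ((n : Nat) : Int)) : Int × Int) else none) = _
        rw [if_pos hv]
        rfl
      · rw [List.find?_cons_of_neg (p := fun j => PySem.List.pyGetD row j 0 == -1) hv]
        show (if (PySem.List.pyGetD row ((n : Nat) : Int) 0 == -1) = true
              then some ((i, ((n : Nat) : Int)) : Int × Int) else none) = _
        rw [if_neg hv]
        rfl

-- the positional find? of A equals the value-based index? of B on the truncated row
theorem pvFindTake (row : List Int) (m : Nat) :
    (PySem.List.pyRange 0 (m : Int)).find? (fun j => PySem.List.pyGetD row j 0 == -1)
      = (PySem.List.index? (row.take m) (-1)).map (fun k => (k : Int)) := by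
  induction m with
  | zero =>
    rw [PySem.List.pyRange_one_eq_nil (by norm_num)]
    rfl
  | succ m ih =>
    have hcast : ((m + 1 : Nat) : Int) = (m : Int) + 1 := by push_cast; ring
    rw [hcast, PySem.List.pyRange_one_succ_right (by positivity), List.find?_append, ih]
    cases hI : PySem.List.index? (row.take m) (-1) with
    | some k =>
      have hmem : (-1 : Int) ∈ row.take m := by
        have := (PySem.List.index?_isSome_iff (xs := row.take m) (v := (-1 : Int))).mp
          (by rw [hI]; rfl)
        exact this
      have htk : PySem.List.index? (row.take (m + 1)) (-1) = some k := by
        rw [List.take_succ, PySem.List.index?_append_of_mem _ hmem, hI]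
      rw [htk]
      rfl
    | none =>
      have hnm : (-1 : Int) ∉ row.take m := by
        rw [← PySem.List.index?_eq_none_iff (xs := row.take m) (v := (-1 : Int))]
        exact hI
      by_cases hm : m < row.length
      · have hget : PySem.List.pyGetD row ((m : Nat) : Int) 0 = row[m] := by
          rw [PySem.List.pyGetD_natCast, List.getD_eq_getElem _ _ hm]
        have htk : row.take (m + 1) = row.take m ++ [row[m]] := by
          rw [List.take_succ, List.getElem?_eq_getElem hm]
          rfl
        by_cases hv : row[m] = (-1 : Int)
        · have htI : PySem.List.index? (row.take (m + 1)) (-1) = some m := by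
            rw [htk, hv, PySem.List.index?_append_singleton_self _ _ hnm]
            congr 1
            simp
            omega
          rw [htI, List.find?_singleton, hget, if_pos (by simp [hv])]
          rfl
        · have htI : PySem.List.index? (row.take (m + 1)) (-1) = none := by
            rw [PySem.List.index?_eq_none_iff, htk]
            simp only [List.mem_append, List.mem_singleton]
            rintro (h | h)
            · exact hnm h
            · exact hv h.symm
          rw [htI, List.find?_singleton, hget, if_neg (by simp [hv])]
          rfl
      · have htk : row.take (m + 1) = row.take m := by
          rw [List.take_of_length_le (by omega), List.take_of_length_le (by omega)]
        have hget : PySem.List.pyGetD row ((m : Nat) : Int) 0 = 0 := by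
          rw [PySem.List.pyGetD_natCast, List.getD_eq_getElem?_getD,
              List.getElem?_eq_none (by omega : row.length ≤ m)]
          rfl
        rw [htk, hI, List.find?_singleton, hget, if_neg (by norm_num)]
        rfl

theorem pvFirstEmpty_eq (sudoku : List (List Int)) :
    pvFirstEmptyA sudoku = pvFirstEmptyB sudoku (PySem.List.len sudoku) := by
  unfold pvFirstEmptyA pvFirstEmptyB
  have hslice : PySem.List.slice sudoku none (some (PySem.List.len sudoku)) = sudoku := by
    rw [PySem.List.len_eq, PySem.List.slice_to _ (by positivity)]
    simp
  rw [hslice, PySem.List.enumerate_eq_map_pyRange sudoku ([] : List Int), List.foldl_map]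
  simp only [PySem.List.len_eq]
  refine (PySem.List.foldl_congr_mem _ _ _ _ (fun acc i hi => ?_))
  cases acc with
  | some r => rfl
  | none =>
    rw [PySem.List.mem_pyRange_one] at hi
    show _ = (if (PySem.List.slice (PySem.List.pyGetD sudoku i []) none
        (some ((sudoku.length : Nat) : Int))).contains (-1) = true then _ else _)
    rw [pvScanInner_eq (PySem.List.pyGetD sudoku i []) i sudoku.length]
    rw [pvFindTake (PySem.List.pyGetD sudoku i []) sudoku.length]
    rw [PySem.List.slice_to _ (by positivity), Int.toNat_natCast]
    set r := (PySem.List.pyGetD sudoku i []).take sudoku.length with hr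
    by_cases hc : (-1 : Int) ∈ r
    · rw [if_pos (List.contains_iff_mem.mpr hc)]
      cases hI : PySem.List.index? r (-1) with
      | none => rfl
      | some k => rfl
    · rw [if_neg (by simpa using hc)]
      rw [(PySem.List.index?_eq_none_iff (xs := r) (v := (-1:Int))).mpr hc]
      rfl

-- relate A's Option-valued minimum (none = inf) to B's sentinel 10
def pvStMap (st : Int × Int × Option Int) : Int × Int × Int := (st.1, st.2.1, st.2.2.getD 10)

theorem pv_foldl_rel {α σ τ : Type} (m : σ → τ) (f : σ → α → σ) (g : τ → α → τ)
    (l : List α) (s : σ) (h : ∀ s x, x ∈ l → g (m s) x = m (f s x)) :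
    l.foldl g (m s) = m (l.foldl f s) := by
  induction l generalizing s with
  | nil => rfl
  | cons a t ih =>
    rw [List.foldl_cons, List.foldl_cons, h s a (by simp)]
    exact ih _ (fun s x hx => h s x (by simp [hx]))

theorem pvCountB_lt_ten (rows cols boxes : List (PySem.Set Int)) (i j b : Int) :
    pvCountB rows cols boxes i j b < 10 := by
  unfold pvCountB
  have h1 : (PySem.List.pyRange 1 10).countP (fun v =>
      !(PySem.List.pyGetD rows i []).contains v &&
      !(PySem.List.pyGetD cols j []).contains v &&
      !(PySem.List.pyGetD boxes b []).contains v) ≤ (PySem.List.pyRange 1 10).length :=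
    List.countP_le_length
  have h2 : (PySem.List.pyRange 1 10).length = 9 := by decide
  omega

theorem pvMrvStep_eq (sudoku : List (List Int)) (st : Int × Int × Option Int) (i j : Int)
    (h9 : sudoku.length = 9) (hrows : ∀ row ∈ sudoku, 9 ≤ row.length)
    (hi0 : 0 ≤ i) (hi9 : i < 9) (hj0 : 0 ≤ j) (hj9 : j < 9) :
    pvMrvStepB sudoku (pvRowsB sudoku) (pvColsB sudoku) (pvBoxesB sudoku) (pvStMap st) i j
      = pvStMap (pvMrvStepA sudoku (pv_get_domain sudoku) st i j) := by
  unfold pvMrvStepA pvMrvStepB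
  by_cases hcell : (PySem.List.pyGetD (PySem.List.pyGetD sudoku i []) j 0 == -1) = true
  · simp only [hcell, if_true]
    rw [pvGrid_eq sudoku i j hi0 hi9 hj0 hj9]
    simp only [hcell, if_true]
    rw [pvCount_eq sudoku i j h9 hrows hi0 hi9 hj0 hj9]
    set c := pvCountB (pvRowsB sudoku) (pvColsB sudoku) (pvBoxesB sudoku) i j
        (PySem.Int.floordiv i 3 * 3 + PySem.Int.floordiv j 3) with hc
    cases hst : st.2.2 with
    | none =>
      have : (pvStMap st).2.2 = 10 := by simp [pvStMap, hst]
      rw [this, if_pos (pvCountB_lt_ten _ _ _ _ _ _)]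
      simp [pvStMap]
    | some m =>
      have hmm : (pvStMap st).2.2 = m := by simp [pvStMap, hst]
      rw [hmm]
      by_cases hlt : c < m
      · rw [if_pos hlt]
        simp [pvStMap, hlt]
      · rw [if_neg hlt]
        simp [hlt]
  · simp only [Bool.not_eq_true] at hcell
    simp only [hcell, Bool.false_eq_true, if_false]

theorem pvMrv_eq (sudoku : List (List Int)) (x y : Int) (dms : List (List (List Int)))
    (h9 : sudoku.length = 9) (hrows : ∀ row ∈ sudoku, 9 ≤ row.length) :
    pv_get_mrv_position sudoku dms = get_next_position_to_fill_alt sudoku x y true dms := by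
  unfold pv_get_mrv_position get_next_position_to_fill_alt
  simp only [Bool.not_true, if_neg (by decide : ¬ ((false : Bool) = true)), PySem.List.len_eq,
    h9, Nat.cast_ofNat]
  have hfold :
      (PySem.List.pyRange 0 9).foldl (fun st i =>
        (PySem.List.pyRange 0 9).foldl (fun st j =>
          pvMrvStepB sudoku (pvRowsB sudoku) (pvColsB sudoku) (pvBoxesB sudoku) st i j) st)
        ((-1 : Int), (-1 : Int), (10 : Int))
      = pvStMap ((PySem.List.pyRange 0 9).foldl (fun st i =>
        (PySem.List.pyRange 0 9).foldl (fun st j =>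
          pvMrvStepA sudoku (pv_get_domain sudoku) st i j) st)
        ((-1 : Int), (-1 : Int), (none : Option Int))) := by
    have hinit : ((-1 : Int), (-1 : Int), (10 : Int))
        = pvStMap ((-1 : Int), (-1 : Int), (none : Option Int)) := rfl
    rw [hinit]
    refine pv_foldl_rel pvStMap _ _ _ _ (fun st i hi => ?_)
    refine pv_foldl_rel pvStMap _ _ _ _ (fun st' j hj => ?_)
    rw [PySem.List.mem_pyRange_one] at hi hj
    exact pvMrvStep_eq sudoku st' i j h9 hrows hi.1 hi.2 hj.1 hj.2
  rw [hfold]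
  rfl

-- ===== VERDICT (by name: the statement is the Claim_ definition above) =====
theorem get_next_position_to_fill_spec : Claim_equal_get_next_position_to_fill := by
  intro sudoku x y mrv_on dms _hdom hpre
  unfold Spec_get_next_position_to_fill
  cases mrv_on with
  | false =>
    show get_next_position_to_fill sudoku x y false dms = get_next_position_to_fill_alt sudoku x y false dms
    unfold get_next_position_to_fill get_next_position_to_fill_alt
    rw [pvFirstEmpty_eq, if_pos (by decide)]
    simp only [Bool.not_false, if_pos]
  | true =>
    unfold Pre_get_next_position_to_fill at hpre
    simp only [if_pos] at hpre
    show get_next_position_to_fill sudoku x y true dms = get_next_position_to_fill_alt sudoku x y true dms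
    unfold get_next_position_to_fill
    rw [if_neg (by decide)]
    exact pvMrv_eq sudoku x y dms hpre.1 hpre.2
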